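-- pv_equiv track=rewrite | github.com/mthsvct/SGFP | sistema_ger_financas_pessoais/categories/views/edita.py | buscaCat
-- ===== SOURCE A (Python) =====
-- def buscaCat(idCat, categoria):
--     retorno = None
--     index = -1
--     for j, i in enumerate(categoria['itens']):
--         if i['id'] == idCat:
--             retorno = i
--             index = j
--     return retorno, index
-- ===== SOURCE B (Python) =====
-- def buscaCat(idCat, categoria):
--     itens = categoria['itens']
--     for j in range(len(itens) - 1, -1, -1):
--         if itens[j]['id'] == idCat:
--             return itens[j], j
--     return None, -1
-- ===== Notes on version B (the rewrite author's own statement) =====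
-- stated objective: alternative
-- what changed: Replaces the full forward scan that overwrites (retorno, index) on every match with a reverse traversal that returns immediately on the first match (the last forward match).
import Mathlib
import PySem

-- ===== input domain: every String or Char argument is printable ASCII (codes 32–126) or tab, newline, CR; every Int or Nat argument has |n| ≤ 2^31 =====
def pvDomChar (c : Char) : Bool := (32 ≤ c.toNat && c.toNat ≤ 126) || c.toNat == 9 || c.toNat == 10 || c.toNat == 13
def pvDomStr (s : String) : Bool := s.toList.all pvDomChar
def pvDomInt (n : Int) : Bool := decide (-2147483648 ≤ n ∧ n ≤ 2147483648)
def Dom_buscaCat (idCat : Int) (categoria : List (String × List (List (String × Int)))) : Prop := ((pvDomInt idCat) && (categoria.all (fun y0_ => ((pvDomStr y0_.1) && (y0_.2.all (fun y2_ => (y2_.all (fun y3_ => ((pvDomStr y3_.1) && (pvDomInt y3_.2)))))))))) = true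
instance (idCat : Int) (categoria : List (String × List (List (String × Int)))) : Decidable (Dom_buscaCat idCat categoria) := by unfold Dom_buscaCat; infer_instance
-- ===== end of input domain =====

-- B replaces A's full forward overwrite-on-match scan by a reverse traversal that
-- returns on the first match (objective: alternative decomposition, same cost).

-- ===== PORT A =====
-- dict lookup categoria['itens'] / i['id'] is ported as first-match association-list
-- lookup (List.lookup); where Python raises KeyError the lookup is none and the input
-- is excluded by Pre_buscaCat.
def buscaCat (idCat : Int) (categoria : List (String × List (List (String × Int)))) : (Option (List (String × Int))) × Int :=
  match categoria.lookup "itens" with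
  | none => (none, -1)  -- Python: KeyError, excluded by Pre_
  | some itens =>
    (PySem.List.enumerate itens).foldl
      (fun acc ji =>
        if ji.2.lookup "id" = some idCat then (some ji.2, ji.1) else acc)
      (none, -1)

-- ===== PORT B =====
-- for j in range(len(itens)-1, -1, -1): early return on first (reverse) match
def buscaCatRev (idCat : Int) (itens : List (List (String × Int))) : Nat → (Option (List (String × Int))) × Int
  | 0 => (none, -1)
  | j + 1 =>
    match itens[j]? with
    | some i => if i.lookup "id" = some idCat then (some i, (j : Int)) else buscaCatRev idCat itens j
    | none => buscaCatRev idCat itens j  -- unreachable: j < itens.length at every call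

def buscaCat_alt (idCat : Int) (categoria : List (String × List (List (String × Int)))) : (Option (List (String × Int))) × Int :=
  match categoria.lookup "itens" with
  | none => (none, -1)  -- Python: KeyError, excluded by Pre_
  | some itens => buscaCatRev idCat itens itens.length

-- ===== PRECONDITION & SPEC =====
-- Pre_ excludes exactly the inputs on which Python A raises KeyError: a categoria
-- without an "itens" key, or an item without an "id" key.
def Pre_buscaCat (idCat : Int) (categoria : List (String × List (List (String × Int)))) : Prop :=
  (categoria.lookup "itens").isSome = true ∧
  ∀ i ∈ ((categoria.lookup "itens").getD []), (i.lookup "id").isSome = true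
instance (idCat : Int) (categoria : List (String × List (List (String × Int)))) : Decidable (Pre_buscaCat idCat categoria) := by unfold Pre_buscaCat; infer_instance

def pvWitness_buscaCat : Int × (List (String × List (List (String × Int)))) :=
  (1, [("itens", [[("id", 1)], [("id", 2), ("x", 3)], [("id", 1), ("y", 4)]])])

def Spec_buscaCat (idCat : Int) (categoria : List (String × List (List (String × Int)))) (out : (Option (List (String × Int))) × Int) : Prop := out = buscaCat_alt idCat categoria
instance (idCat : Int) (categoria : List (String × List (List (String × Int)))) (out : (Option (List (String × Int))) × Int) : Decidable (Spec_buscaCat idCat categoria out) := by unfold Spec_buscaCat; infer_instance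

-- ===== CLAIM (what is proved, stated in full; the proofs are below) =====
def Claim_equal_buscaCat : Prop := ∀ (idCat : Int) (categoria : List (String × List (List (String × Int)))), Dom_buscaCat idCat categoria → Pre_buscaCat idCat categoria → Spec_buscaCat idCat categoria (buscaCat idCat categoria)

-- ===== LEMMAS AND PROOFS =====

-- indices below j are unaffected by appending an element at the end
lemma buscaCatRev_append (idCat : Int) (xs : List (List (String × Int))) (x : List (String × Int)) :
    ∀ j, j ≤ xs.length → buscaCatRev idCat (xs ++ [x]) j = buscaCatRev idCat xs j := by
  intro j
  induction j with
  | zero => intro _; rfl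
  | succ j ih =>
    intro hj
    have hjlt : j < xs.length := hj
    simp only [buscaCatRev, List.getElem?_append_left hjlt, ih (Nat.le_of_lt hjlt)]

-- the forward overwrite fold equals the reverse first-match search
lemma fold_eq_rev (idCat : Int) (itens : List (List (String × Int))) :
    (PySem.List.enumerate itens).foldl
      (fun acc ji =>
        if ji.2.lookup "id" = some idCat then (some ji.2, ji.1) else acc)
      (none, -1)
    = buscaCatRev idCat itens itens.length := by
  induction itens using List.reverseRecOn with
  | nil => rfl
  | append_singleton xs x ih =>
    rw [show PySem.List.enumerate (xs ++ [x]) = PySem.List.enumerate (xs ++ [x]) 0 from rfl,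
        PySem.List.enumerate_append, List.foldl_append]
    simp only [PySem.List.enumerate_cons, PySem.List.enumerate_nil, List.foldl_cons, List.foldl_nil]
    have hlen : (xs ++ [x]).length = xs.length + 1 := by simp
    rw [hlen]
    simp only [buscaCatRev, List.getElem?_append_right (Nat.le_refl xs.length),
      Nat.sub_self, List.getElem?_cons_zero, buscaCatRev_append idCat xs x xs.length (Nat.le_refl _)]
    rw [ih]
    by_cases h : x.lookup "id" = some idCat <;> simp [h]

-- ===== VERDICT (by name: the statement is the Claim_ definition above) =====
theorem buscaCat_spec : Claim_equal_buscaCat := by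
  intro idCat categoria _ _
  unfold Spec_buscaCat buscaCat buscaCat_alt
  cases categoria.lookup "itens" with
  | none => rfl
  | some itens => exact fold_eq_rev idCat itens
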